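-- pv_equiv track=rewrite | github.com/DivyanshiSrivastava/MonteCarlo-TF | find_subtree.py | compute_distance_between_kmers
-- ===== SOURCE A (Python) =====
-- def depth(kmer):
--     """
--     Compute depth of kmer.
--     Depth of kmer is len(kmer1)/2 + 1.
--     For example:
--          Depth (A) = 1
--          Depth (TAT) = 3/2 + 1 = 2
--          Depth (GTATG) = 5/2 + 1 = 3...
--     """
--     return int(len(kmer)/2 + 1)
--
-- def compute_distance_between_kmers(kmer1, kmer2, mc_tree):
--     """
--     Naive Algorithm to find the Least Common Ancestor:
--     Algorithm 1:
--     Data: 1. Depth of kmer1 and kmer2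
--           2. Parent of each kmer.
--           This information is already stored in the state dictionary.
--
--     Algorithm:
--     while depth(kmer1) != depth(kmer2):
--         if depth(kmer1) > depth(kmer2):
--             kmer2 <- parent(kmer2)
--         elif depth(kmer2) > depth(kmer1):
--             kmer1 <- parent(kmer1)
--     # at this point, the depths of "kmer1" and "kmer2" should be the same.
--
--     while kmer1 != kmer2:
--         kmer1 <- parent(kmer1)
--         kmer2 <- parent(kmer2)
--     LCA <- kmer1
--     return LCA
--
--     Algorithm 2:
--     Data: kmer1, kmer2 and LCA
--     Distance(kmer1, kmer2) = Distance (kmer1, LCA) + Distance(kmer2, LCA)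
--
--     Parameters:
--         kmer1 (str): kmer1
--         kmer2 (str): kmer2
--         mc_tree (dict) : mc_tree
--
--     Returns:
--         Distance(kmer1, kmer2)
--     """
--     node1 = kmer1
--     node2 = kmer2
--
--     while depth(node1) != depth(node2):
--         if depth(node1) > depth(node2):
--             node1 = mc_tree[node1]['parent']
--         elif depth(node2) > depth(node1):
--             node2 = mc_tree[node2]['parent']
--
--     assert depth(node1) == depth(node2)
--
--     while node1 != node2:
--         node1 = mc_tree[node1]['parent']
--         node2 = mc_tree[node2]['parent']
--
--     assert node1 == node2
--     lca = node1
--     distance_between_nodes = (depth(kmer1) - depth(lca)) + (depth(kmer2) - depth(lca))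
--     return distance_between_nodes
-- ===== SOURCE B (Python) =====
-- def depth(kmer):
--     """
--     Compute depth of kmer.
--     Depth of kmer is len(kmer1)/2 + 1.
--     """
--     return int(len(kmer)/2 + 1)
--
--
-- def _path_to_root(node, mc_tree):
--     """Root-ward path [node, parent(node), ..., root] (root has depth 1)."""
--     if depth(node) > 1:
--         return [node] + _path_to_root(mc_tree[node]['parent'], mc_tree)
--     return [node]
--
--
-- def _lcp(p1, p2):
--     """Length of the longest common prefix of two lists."""
--     if p1 and p2 and p1[0] == p2[0]:
--         return 1 + _lcp(p1[1:], p2[1:])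
--     return 0
--
--
-- def compute_distance_between_kmers(kmer1, kmer2, mc_tree):
--     """
--     Path-comparison algorithm: materialise the full root-first ancestor path
--     of each kmer, take the length c of their common prefix (the LCA is the
--     last shared node), and return (len(p1) - c) + (len(p2) - c), i.e. the
--     number of edges from each kmer down to the LCA.
--     """
--     if kmer1 == kmer2:
--         return 0
--     p1 = _path_to_root(kmer1, mc_tree)[::-1]
--     p2 = _path_to_root(kmer2, mc_tree)[::-1]
--     c = _lcp(p1, p2)
--     return (len(p1) - c) + (len(p2) - c)
-- ===== Notes on version B (the rewrite author's own statement) =====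
-- stated objective: alternative
-- what changed: A's two synchronised climbing loops (equalise depths, then climb both nodes in lockstep until they meet) are replaced by materialising both root-first ancestor paths and taking the length of their common prefix; the distance is the sum of the path lengths beyond the shared prefix, with a fast path for kmer1 == kmer2.
-- outside the precondition, e.g. on compute_distance_between_kmers('AAAAA', 'AAA', {'AAAAA': {'parent': 'AAA'}}): A returns 1, B raises KeyError
import Mathlib
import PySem

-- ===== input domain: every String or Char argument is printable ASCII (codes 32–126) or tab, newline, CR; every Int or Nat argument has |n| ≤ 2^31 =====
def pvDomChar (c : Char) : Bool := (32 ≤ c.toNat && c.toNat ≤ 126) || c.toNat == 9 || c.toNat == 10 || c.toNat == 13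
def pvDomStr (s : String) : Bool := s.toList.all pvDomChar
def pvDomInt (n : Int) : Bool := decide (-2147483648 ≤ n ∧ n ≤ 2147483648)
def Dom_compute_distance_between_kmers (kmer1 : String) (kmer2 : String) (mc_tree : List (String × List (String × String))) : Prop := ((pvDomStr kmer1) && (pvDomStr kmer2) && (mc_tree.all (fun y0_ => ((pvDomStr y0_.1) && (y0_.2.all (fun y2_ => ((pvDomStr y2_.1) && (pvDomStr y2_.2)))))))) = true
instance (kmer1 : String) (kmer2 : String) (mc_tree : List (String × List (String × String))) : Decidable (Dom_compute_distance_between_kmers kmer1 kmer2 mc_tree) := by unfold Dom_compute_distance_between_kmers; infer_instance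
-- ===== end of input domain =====

-- B replaces A's two synchronised climbing loops by materialising both root-first ancestor
-- paths and measuring their common prefix (objective: alternative decomposition, same cost).
-- Loops/recursions are ported with fuel (|kmer| + 2 bounds the recursion depth on every input
-- Pre_ admits); fuel exhaustion / KeyError return the unreachable default 0 — Pre_ excludes those.

-- depth(kmer) = int(len(kmer)/2 + 1); len ≥ 0, so the float truncation is exactly floor division
def pvDepth (kmer : String) : Int := PySem.Int.floordiv (PySem.Str.len kmer) 2 + 1

-- mc_tree[n]['parent'] (first-match association-list lookup, as Python's dict)
def pvParent? (mc_tree : List (String × List (String × String))) (n : String) : Option String :=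
  match (PySem.Dict.mk mc_tree).get? n with
  | some subs => (PySem.Dict.mk subs).get? "parent"
  | none => none

-- ===== PORT A =====
-- first while loop: climb the deeper node until the depths agree
def pvLoopEq (mc_tree : List (String × List (String × String))) :
    Nat → String → String → Option (String × String)
  | 0, _, _ => none
  | fuel+1, n1, n2 =>
    if pvDepth n1 ≠ pvDepth n2 then
      if pvDepth n1 > pvDepth n2 then
        match pvParent? mc_tree n1 with
        | some p => pvLoopEq mc_tree fuel p n2
        | none => none
      else if pvDepth n2 > pvDepth n1 then
        match pvParent? mc_tree n2 with
        | some p => pvLoopEq mc_tree fuel n1 p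
        | none => none
      else pvLoopEq mc_tree fuel n1 n2  -- Python: body falls through unchanged (unreachable)
    else some (n1, n2)

-- second while loop: climb both nodes together until they meet
def pvLoopMeet (mc_tree : List (String × List (String × String))) :
    Nat → String → String → Option String
  | 0, _, _ => none
  | fuel+1, n1, n2 =>
    if n1 ≠ n2 then
      match pvParent? mc_tree n1, pvParent? mc_tree n2 with
      | some p1, some p2 => pvLoopMeet mc_tree fuel p1 p2
      | _, _ => none
    else some n1

def compute_distance_between_kmers (kmer1 : String) (kmer2 : String) (mc_tree : List (String × List (String × String))) : Int :=
  match pvLoopEq mc_tree (kmer1.toList.length + kmer2.toList.length + 2) kmer1 kmer2 with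
  | none => 0
  | some (n1, n2) =>
    match pvLoopMeet mc_tree (kmer1.toList.length + kmer2.toList.length + 2) n1 n2 with
    | none => 0
    | some lca => (pvDepth kmer1 - pvDepth lca) + (pvDepth kmer2 - pvDepth lca)

-- ===== PORT B =====
-- _path_to_root: the list [node, parent(node), ..., root] (root = depth 1)
def pvPathUp (mc_tree : List (String × List (String × String))) :
    Nat → String → Option (List String)
  | 0, _ => none
  | fuel+1, n =>
    if pvDepth n > 1 then
      match pvParent? mc_tree n with
      | some p => (pvPathUp mc_tree fuel p).map (fun rest => n :: rest)
      | none => none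
    else some [n]

-- _lcp: length of the longest common prefix of two lists
def pvLcp : List String → List String → Nat
  | x :: xs, y :: ys => if x = y then 1 + pvLcp xs ys else 0
  | _, _ => 0

def compute_distance_between_kmers_alt (kmer1 : String) (kmer2 : String) (mc_tree : List (String × List (String × String))) : Int :=
  if kmer1 = kmer2 then 0
  else
    match pvPathUp mc_tree (kmer1.toList.length + 2) kmer1,
          pvPathUp mc_tree (kmer2.toList.length + 2) kmer2 with
    | some q1, some q2 =>
      let p1 := q1.reverse
      let p2 := q2.reverse
      let c := pvLcp p1 p2
      ((p1.length : Int) - (c : Int)) + ((p2.length : Int) - (c : Int))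
    | _, _ => 0

-- ===== PRECONDITION & SPEC =====
-- Nat-valued depth, for stating the precondition
def pvDep (s : String) : Nat := s.toList.length / 2 + 1

-- Pre_ excludes (unless kmer1 == kmer2, where A touches nothing) trees that are not globally
-- well-formed — both kmers keys, every key of depth > 1 having an in-tree parent exactly one
-- level up, and a unique depth-1 root.  On other inputs A either raises KeyError / loops
-- forever, or returns only because the malformed region lies above the LCA it never visits,
-- while B's full climb of each kmer to the root would raise KeyError there.
def Pre_compute_distance_between_kmers (kmer1 : String) (kmer2 : String) (mc_tree : List (String × List (String × String))) : Prop :=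
  kmer1 = kmer2 ∨
  ( ((PySem.Dict.mk mc_tree).get? kmer1).isSome = true ∧
    ((PySem.Dict.mk mc_tree).get? kmer2).isSome = true ∧
    (∀ p ∈ mc_tree, 2 ≤ pvDep p.1 →
      ∃ q ∈ (pvParent? mc_tree p.1).toList,
        ((PySem.Dict.mk mc_tree).get? q).isSome = true ∧ pvDep q + 1 = pvDep p.1) ∧
    (∀ p ∈ mc_tree, ∀ p' ∈ mc_tree, pvDep p.1 = 1 → pvDep p'.1 = 1 → p.1 = p'.1) )

instance (kmer1 : String) (kmer2 : String) (mc_tree : List (String × List (String × String))) : Decidable (Pre_compute_distance_between_kmers kmer1 kmer2 mc_tree) := by unfold Pre_compute_distance_between_kmers; infer_instance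

def pvWitness_compute_distance_between_kmers : String × String × (List (String × List (String × String))) :=
  ("GTATG", "AAA", [("A", []), ("AAA", [("parent", "A")]), ("TAT", [("parent", "A")]), ("GTATG", [("parent", "TAT")])])

def Spec_compute_distance_between_kmers (kmer1 : String) (kmer2 : String) (mc_tree : List (String × List (String × String))) (out : Int) : Prop := out = compute_distance_between_kmers_alt kmer1 kmer2 mc_tree
instance (kmer1 : String) (kmer2 : String) (mc_tree : List (String × List (String × String))) (out : Int) : Decidable (Spec_compute_distance_between_kmers kmer1 kmer2 mc_tree out) := by unfold Spec_compute_distance_between_kmers; infer_instance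

-- ===== CLAIM (what is proved, stated in full; the proofs are below) =====
def Claim_equal_compute_distance_between_kmers : Prop := ∀ (kmer1 : String) (kmer2 : String) (mc_tree : List (String × List (String × String))), Dom_compute_distance_between_kmers kmer1 kmer2 mc_tree → Pre_compute_distance_between_kmers kmer1 kmer2 mc_tree → Spec_compute_distance_between_kmers kmer1 kmer2 mc_tree (compute_distance_between_kmers kmer1 kmer2 mc_tree)

-- ===== LEMMAS AND PROOFS =====

-- iterated parent pointer
def pvUpN (t : List (String × List (String × String))) : Nat → String → Option String
  | 0, n => some n
  | i+1, n =>
    match pvParent? t n with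
    | some p => pvUpN t i p
    | none => none

-- "n is a key of t sitting at height h (depth h+1)"
def pvGood (t : List (String × List (String × String))) (h : Nat) (n : String) : Prop :=
  ((PySem.Dict.mk t).get? n).isSome = true ∧ pvDep n = h + 1

-- the two halves of the well-formedness precondition, named
def pvWF (t : List (String × List (String × String))) : Prop :=
  ∀ p ∈ t, 2 ≤ pvDep p.1 →
    ∃ q ∈ (pvParent? t p.1).toList,
      ((PySem.Dict.mk t).get? q).isSome = true ∧ pvDep q + 1 = pvDep p.1

def pvRootU (t : List (String × List (String × String))) : Prop :=
  ∀ p ∈ t, ∀ p' ∈ t, pvDep p.1 = 1 → pvDep p'.1 = 1 → p.1 = p'.1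

theorem pvDepth_eq (s : String) : pvDepth s = (pvDep s : Int) := by
  unfold pvDepth pvDep
  rw [PySem.Str.len_eq]
  have h := PySem.Int.floordiv_natCast s.toList.length 2
  push_cast at h ⊢
  omega

theorem pvKey_mem {t : List (String × List (String × String))} {n : String}
    (h : ((PySem.Dict.mk t).get? n).isSome = true) : ∃ p ∈ t, p.1 = n := by
  induction t with
  | nil => simp [PySem.Dict.get?] at h
  | cons hd tl ih =>
    rw [show PySem.Dict.mk (hd :: tl) = PySem.Dict.mk ((hd.1, hd.2) :: tl) by rfl,
      PySem.Dict.get?_mk_cons] at h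
    by_cases he : hd.1 == n
    · exact ⟨hd, List.mem_cons_self, by simpa using he⟩
    · rw [if_neg he] at h
      obtain ⟨p, hp, hpn⟩ := ih h
      exact ⟨p, List.mem_cons_of_mem _ hp, hpn⟩

theorem pvGood_step {t : List (String × List (String × String))} (hWF : pvWF t)
    {h : Nat} {n : String} (hg : pvGood t (h+1) n) :
    ∃ p, pvParent? t n = some p ∧ pvGood t h p := by
  obtain ⟨hk, hd⟩ := hg
  obtain ⟨p, hp, rfl⟩ := pvKey_mem hk
  obtain ⟨q, hq, hqs, hqd⟩ := hWF p hp (by omega)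
  refine ⟨q, by simpa using hq, hqs, by omega⟩

theorem pvRoot_eq {t : List (String × List (String × String))} (hR : pvRootU t)
    {n n' : String} (hg : pvGood t 0 n) (hg' : pvGood t 0 n') : n = n' := by
  obtain ⟨p, hp, rfl⟩ := pvKey_mem hg.1
  obtain ⟨p', hp', rfl⟩ := pvKey_mem hg'.1
  exact hR p hp p' hp' hg.2 hg'.2

theorem pvUpN_add (t : List (String × List (String × String))) (i j : Nat) (n : String) :
    pvUpN t (i + j) n = match pvUpN t i n with
      | some m => pvUpN t j m
      | none => none := by
  induction i generalizing n with
  | zero => simp [pvUpN]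
  | succ i ih =>
    rw [show i + 1 + j = (i + j) + 1 by omega]
    rw [pvUpN, pvUpN]
    cases pvParent? t n with
    | none => rfl
    | some p => exact ih p

theorem pvChain {t : List (String × List (String × String))} (hWF : pvWF t) :
    ∀ (i h : Nat) (n : String), pvGood t h n → i ≤ h →
      ∃ v, pvUpN t i n = some v ∧ pvGood t (h - i) v := by
  intro i
  induction i with
  | zero => exact fun h n hg _ => ⟨n, rfl, by simpa using hg⟩
  | succ i ih =>
    intro h n hg hle
    obtain ⟨h', rfl⟩ : ∃ h', h = h' + 1 := ⟨h - 1, by omega⟩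
    obtain ⟨p, hp, hgp⟩ := pvGood_step hWF hg
    obtain ⟨v, hv, hgv⟩ := ih h' p hgp (by omega)
    refine ⟨v, ?_, by rw [show h' + 1 - (i + 1) = h' - i by omega]; exact hgv⟩
    rw [pvUpN, hp]; exact hv

theorem pvLoopEq_spec {t : List (String × List (String × String))} (hWF : pvWF t) :
    ∀ (fuel h1 h2 : Nat) (n1 n2 : String), pvGood t h1 n1 → pvGood t h2 n2 →
      (h1 - h2) + (h2 - h1) < fuel →
      ∃ a1 a2, pvLoopEq t fuel n1 n2 = some (a1, a2) ∧
        pvUpN t (h1 - min h1 h2) n1 = some a1 ∧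
        pvUpN t (h2 - min h1 h2) n2 = some a2 ∧
        pvGood t (min h1 h2) a1 ∧ pvGood t (min h1 h2) a2 := by
  intro fuel
  induction fuel with
  | zero => intro h1 h2 n1 n2 _ _ hlt; omega
  | succ fuel ih =>
    intro h1 h2 n1 n2 hg1 hg2 hlt
    have d1 : pvDepth n1 = ((h1 : Int) + 1) := by
      rw [pvDepth_eq, hg1.2]; push_cast; ring
    have d2 : pvDepth n2 = ((h2 : Int) + 1) := by
      rw [pvDepth_eq, hg2.2]; push_cast; ring
    rcases Nat.lt_trichotomy h1 h2 with hc | hc | hc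
    · -- h1 < h2 : climb n2
      obtain ⟨h2', rfl⟩ : ∃ h2', h2 = h2' + 1 := ⟨h2 - 1, by omega⟩
      obtain ⟨p, hp, hgp⟩ := pvGood_step hWF hg2
      obtain ⟨a1, a2, hres, hu1, hu2, hga1, hga2⟩ :=
        ih h1 h2' n1 p hg1 hgp (by omega)
      refine ⟨a1, a2, ?_, ?_, ?_, ?_, ?_⟩
      · rw [pvLoopEq, if_pos (by rw [d1, d2]; intro h; omega),
          if_neg (by rw [d1, d2]; omega), if_pos (by rw [d1, d2]; omega), hp]
        exact hres
      · rwa [show h1 - min h1 (h2' + 1) = h1 - min h1 h2' by omega]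
      · rw [show h2' + 1 - min h1 (h2' + 1) = (h2' - min h1 h2') + 1 by omega,
          pvUpN, hp]
        exact hu2
      · rwa [show min h1 (h2' + 1) = min h1 h2' by omega]
      · rwa [show min h1 (h2' + 1) = min h1 h2' by omega]
    · -- equal depths: the loop exits
      subst hc
      refine ⟨n1, n2, ?_, by simp [pvUpN], by simp [pvUpN], by simpa using hg1,
        by simpa using hg2⟩
      rw [pvLoopEq, if_neg (by rw [d1, d2]; intro h; exact h rfl)]
    · -- h2 < h1 : climb n1
      obtain ⟨h1', rfl⟩ : ∃ h1', h1 = h1' + 1 := ⟨h1 - 1, by omega⟩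
      obtain ⟨p, hp, hgp⟩ := pvGood_step hWF hg1
      obtain ⟨a1, a2, hres, hu1, hu2, hga1, hga2⟩ :=
        ih h1' h2 p n2 hgp hg2 (by omega)
      refine ⟨a1, a2, ?_, ?_, ?_, ?_, ?_⟩
      · rw [pvLoopEq, if_pos (by rw [d1, d2]; intro h; omega),
          if_pos (by rw [d1, d2]; omega), hp]
        exact hres
      · rw [show h1' + 1 - min (h1' + 1) h2 = (h1' - min h1' h2) + 1 by omega,
          pvUpN, hp]
        exact hu1
      · rwa [show h2 - min (h1' + 1) h2 = h2 - min h1' h2 by omega]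
      · rwa [show min (h1' + 1) h2 = min h1' h2 by omega]
      · rwa [show min (h1' + 1) h2 = min h1' h2 by omega]

theorem pvLoopMeet_spec {t : List (String × List (String × String))} (hWF : pvWF t)
    (hR : pvRootU t) :
    ∀ (h fuel : Nat) (n1 n2 : String), pvGood t h n1 → pvGood t h n2 → h < fuel →
      ∃ lca j, pvLoopMeet t fuel n1 n2 = some lca ∧ j ≤ h ∧
        pvUpN t j n1 = some lca ∧ pvUpN t j n2 = some lca ∧
        (∀ i < j, ∀ x y, pvUpN t i n1 = some x → pvUpN t i n2 = some y → x ≠ y) := by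
  intro h
  induction h with
  | zero =>
    intro fuel n1 n2 hg1 hg2 hlt
    obtain ⟨f, rfl⟩ : ∃ f, fuel = f + 1 := ⟨fuel - 1, by omega⟩
    have heq : n1 = n2 := pvRoot_eq hR hg1 hg2
    subst heq
    exact ⟨n1, 0, by rw [pvLoopMeet, if_neg (by simp)], by omega, rfl, rfl,
      by omega⟩
  | succ h ih =>
    intro fuel n1 n2 hg1 hg2 hlt
    obtain ⟨f, rfl⟩ : ∃ f, fuel = f + 1 := ⟨fuel - 1, by omega⟩
    by_cases hne : n1 = n2
    · subst hne
      exact ⟨n1, 0, by rw [pvLoopMeet, if_neg (by simp)], by omega, rfl, rfl,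
        by omega⟩
    · obtain ⟨p1, hp1, hgp1⟩ := pvGood_step hWF hg1
      obtain ⟨p2, hp2, hgp2⟩ := pvGood_step hWF hg2
      obtain ⟨lca, j, hres, hj, hu1, hu2, hmin⟩ := ih f p1 p2 hgp1 hgp2 (by omega)
      refine ⟨lca, j + 1, ?_, by omega, ?_, ?_, ?_⟩
      · rw [pvLoopMeet, if_pos hne, hp1, hp2]; exact hres
      · rw [pvUpN, hp1]; exact hu1
      · rw [pvUpN, hp2]; exact hu2
      · intro i hi x y hx hy
        cases i with
        | zero =>
          simp only [pvUpN, Option.some_inj] at hx hy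
          subst hx; subst hy; exact hne
        | succ i =>
          rw [pvUpN, hp1] at hx
          rw [pvUpN, hp2] at hy
          exact hmin i (by omega) x y hx hy

-- the path built by B lists exactly the iterated parents: q[i]? = pvUpN i n, |q| = h+1
theorem pvPathUp_spec {t : List (String × List (String × String))} (hWF : pvWF t) :
    ∀ (h fuel : Nat) (n : String), pvGood t h n → h < fuel →
      ∃ q, pvPathUp t fuel n = some q ∧ q.length = h + 1 ∧
        ∀ i ≤ h, q[i]? = pvUpN t i n := by
  intro h
  induction h with
  | zero =>
    intro fuel n hg hlt
    obtain ⟨f, rfl⟩ : ∃ f, fuel = f + 1 := ⟨fuel - 1, by omega⟩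
    have d : pvDepth n = 1 := by rw [pvDepth_eq, hg.2]; simp
    refine ⟨[n], by rw [pvPathUp, if_neg (by rw [d]; omega)], rfl, ?_⟩
    intro i hi
    interval_cases i
    simp [pvUpN]
  | succ h ih =>
    intro fuel n hg hlt
    obtain ⟨f, rfl⟩ : ∃ f, fuel = f + 1 := ⟨fuel - 1, by omega⟩
    have d : pvDepth n = ((h : Int) + 2) := by rw [pvDepth_eq, hg.2]; push_cast; ring
    obtain ⟨p, hp, hgp⟩ := pvGood_step hWF hg
    obtain ⟨q', hq', hlen, hidx⟩ := ih f p hgp (by omega)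
    refine ⟨n :: q', ?_, by simp [hlen], ?_⟩
    · rw [pvPathUp, if_pos (by rw [d]; omega), hp]
      simp [hq']
    · intro i hi
      cases i with
      | zero => simp [pvUpN]
      | succ i =>
        rw [show (n :: q')[i+1]? = q'[i]? by simp, pvUpN, hp]
        exact hidx i (by omega)

-- characterisation of pvLcp: agreement below c and a mismatch (or end) at c pin its value
theorem pvLcp_eq : ∀ (c : Nat) (xs ys : List String),
    (∀ i < c, ∃ v, xs[i]? = some v ∧ ys[i]? = some v) →
    (xs[c]? = none ∨ ys[c]? = none ∨ xs[c]? ≠ ys[c]?) →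
    pvLcp xs ys = c := by
  intro c
  induction c with
  | zero =>
    intro xs ys _ hstop
    cases xs with
    | nil => rfl
    | cons x xs' =>
      cases ys with
      | nil => rfl
      | cons y ys' =>
        have hxy : x ≠ y := by
          rcases hstop with h | h | h
          · simp at h
          · simp at h
          · simpa using h
        simp [pvLcp, hxy]
  | succ c ih =>
    intro xs ys hagree hstop
    obtain ⟨v, hx0, hy0⟩ := hagree 0 (by omega)
    cases xs with
    | nil => simp at hx0
    | cons x xs' =>
      cases ys with
      | nil => simp at hy0
      | cons y ys' =>
        simp only [List.getElem?_cons_zero, Option.some_inj] at hx0 hy0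
        subst hx0; subst hy0
        have hrec : pvLcp xs' ys' = c := by
          apply ih
          · intro i hi
            obtain ⟨w, hw1, hw2⟩ := hagree (i + 1) (by omega)
            exact ⟨w, by simpa using hw1, by simpa using hw2⟩
          · rcases hstop with h | h | h
            · exact Or.inl (by simpa using h)
            · exact Or.inr (Or.inl (by simpa using h))
            · exact Or.inr (Or.inr (by simpa using h))
        rw [pvLcp, if_pos rfl, hrec]
        omega

-- index into a reversed path of length h+1
theorem pvRevIdx (q : List String) (h i : Nat) (hq : q.length = h + 1) (hi : i ≤ h) :
    q.reverse[i]? = q[h - i]? := by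
  rw [List.getElem?_reverse (by omega), hq, show h + 1 - 1 - i = h - i by omega]

-- equal kmers: A's loops exit at once (value 0) and B's fast path fires
theorem pvEqCase (k : String) (t : List (String × List (String × String))) :
    compute_distance_between_kmers k k t = compute_distance_between_kmers_alt k k t := by
  have hF : k.toList.length + k.toList.length + 2
      = (k.toList.length + k.toList.length + 1) + 1 := by omega
  have h1 : pvLoopEq t (k.toList.length + k.toList.length + 2) k k = some (k, k) := by
    rw [hF, pvLoopEq, if_neg (by simp)]
  have h2 : pvLoopMeet t (k.toList.length + k.toList.length + 2) k k = some k := by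
    rw [hF, pvLoopMeet, if_neg (by simp)]
  unfold compute_distance_between_kmers compute_distance_between_kmers_alt
  rw [h1]
  simp only [h2]
  simp

theorem pv_main (k1 k2 : String) (t : List (String × List (String × String)))
    (hk : k1 ≠ k2)
    (hs1 : ((PySem.Dict.mk t).get? k1).isSome = true)
    (hs2 : ((PySem.Dict.mk t).get? k2).isSome = true)
    (hWF : pvWF t) (hR : pvRootU t) :
    compute_distance_between_kmers k1 k2 t = compute_distance_between_kmers_alt k1 k2 t := by
  obtain ⟨h1, hh1⟩ : ∃ h, pvDep k1 = h + 1 := ⟨pvDep k1 - 1, by unfold pvDep; omega⟩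
  obtain ⟨h2, hh2⟩ : ∃ h, pvDep k2 = h + 1 := ⟨pvDep k2 - 1, by unfold pvDep; omega⟩
  have hb1 : h1 ≤ k1.toList.length := by unfold pvDep at hh1; omega
  have hb2 : h2 ≤ k2.toList.length := by unfold pvDep at hh2; omega
  have hg1 : pvGood t h1 k1 := ⟨hs1, hh1⟩
  have hg2 : pvGood t h2 k2 := ⟨hs2, hh2⟩
  -- run A's two loops
  obtain ⟨a1, a2, hA1, hua1, hua2, hga1, hga2⟩ :=
    pvLoopEq_spec hWF (k1.toList.length + k2.toList.length + 2) h1 h2 k1 k2 hg1 hg2 (by omega)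
  obtain ⟨lcaA, j, hA2, hj, hj1, hj2, hminA⟩ :=
    pvLoopMeet_spec hWF hR (min h1 h2) (k1.toList.length + k2.toList.length + 2) a1 a2
      hga1 hga2 (by omega)
  -- the LCA's height
  set hl : Nat := min h1 h2 - j with hhl
  obtain ⟨v, hv, hgv⟩ := pvChain hWF j (min h1 h2) a1 hga1 hj
  have hvL : v = lcaA := by rw [hv] at hj1; exact Option.some_inj.mp hj1
  have hgL : pvGood t hl lcaA := hvL ▸ hgv
  -- climbs from k1/k2 reach the LCA in h1-hl / h2-hl steps
  have hcompA1 : pvUpN t (h1 - hl) k1 = some lcaA := by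
    rw [show h1 - hl = h1 - min h1 h2 + j by omega, pvUpN_add, hua1]; exact hj1
  have hcompA2 : pvUpN t (h2 - hl) k2 = some lcaA := by
    rw [show h2 - hl = h2 - min h1 h2 + j by omega, pvUpN_add, hua2]; exact hj2
  -- run B's path builders
  obtain ⟨q1, hB1, hlen1, hidx1⟩ :=
    pvPathUp_spec hWF h1 (k1.toList.length + 2) k1 hg1 (by omega)
  obtain ⟨q2, hB2, hlen2, hidx2⟩ :=
    pvPathUp_spec hWF h2 (k2.toList.length + 2) k2 hg2 (by omega)
  -- the reversed paths agree exactly on the first hl+1 entries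
  have hrev1 : ∀ i ≤ h1, q1.reverse[i]? = pvUpN t (h1 - i) k1 := fun i hi => by
    rw [pvRevIdx q1 h1 i hlen1 hi]; exact hidx1 (h1 - i) (by omega)
  have hrev2 : ∀ i ≤ h2, q2.reverse[i]? = pvUpN t (h2 - i) k2 := fun i hi => by
    rw [pvRevIdx q2 h2 i hlen2 hi]; exact hidx2 (h2 - i) (by omega)
  have hagree : ∀ i < hl + 1, ∃ w, q1.reverse[i]? = some w ∧ q2.reverse[i]? = some w := by
    intro i hi
    obtain ⟨w, hw, _⟩ := pvChain hWF (hl - i) hl lcaA hgL (by omega)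
    refine ⟨w, ?_, ?_⟩
    · rw [hrev1 i (by omega), show h1 - i = (h1 - hl) + (hl - i) by omega,
        pvUpN_add, hcompA1]
      exact hw
    · rw [hrev2 i (by omega), show h2 - i = (h2 - hl) + (hl - i) by omega,
        pvUpN_add, hcompA2]
      exact hw
  have hstop : q1.reverse[hl + 1]? = none ∨ q2.reverse[hl + 1]? = none ∨
      q1.reverse[hl + 1]? ≠ q2.reverse[hl + 1]? := by
    cases j with
    | zero =>
      -- lcaA is a1 = a2 at height min h1 h2; one path ends exactly there
      rcases Nat.le_total h1 h2 with hmn | hmn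
      · exact Or.inl (List.getElem?_eq_none_iff.mpr
          (by rw [List.length_reverse, hlen1]; omega))
      · exact Or.inr (Or.inl (List.getElem?_eq_none_iff.mpr
          (by rw [List.length_reverse, hlen2]; omega)))
    | succ j' =>
      -- the nodes one level below the LCA differ (A's meet loop did not stop there)
      refine Or.inr (Or.inr ?_)
      obtain ⟨x, hx, _⟩ := pvChain hWF j' (min h1 h2) a1 hga1 (by omega)
      obtain ⟨y, hy, _⟩ := pvChain hWF j' (min h1 h2) a2 hga2 (by omega)
      have e1 : q1.reverse[hl + 1]? = some x := by
        rw [hrev1 (hl + 1) (by omega),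
          show h1 - (hl + 1) = (h1 - min h1 h2) + j' by omega, pvUpN_add, hua1]
        exact hx
      have e2 : q2.reverse[hl + 1]? = some y := by
        rw [hrev2 (hl + 1) (by omega),
          show h2 - (hl + 1) = (h2 - min h1 h2) + j' by omega, pvUpN_add, hua2]
        exact hy
      rw [e1, e2]
      intro hcon
      exact hminA j' (by omega) x y hx hy (Option.some_inj.mp hcon)
  have hc : pvLcp q1.reverse q2.reverse = hl + 1 := pvLcp_eq (hl + 1) _ _ hagree hstop
  -- both sides now reduce to the same arithmetic in h1, h2, hl
  have dL : pvDepth lcaA = ((hl : Int) + 1) := by rw [pvDepth_eq, hgL.2]; push_cast; ring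
  have d1 : pvDepth k1 = ((h1 : Int) + 1) := by rw [pvDepth_eq, hh1]; push_cast; ring
  have d2 : pvDepth k2 = ((h2 : Int) + 1) := by rw [pvDepth_eq, hh2]; push_cast; ring
  unfold compute_distance_between_kmers compute_distance_between_kmers_alt
  rw [if_neg hk, hA1]
  simp only [hA2, hB1, hB2, hc, List.length_reverse, hlen1, hlen2, dL, d1, d2]
  push_cast
  omega

-- ===== VERDICT (by name: the statement is the Claim_ definition above) =====
theorem compute_distance_between_kmers_spec : Claim_equal_compute_distance_between_kmers := by
  intro k1 k2 t _ hpre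
  unfold Spec_compute_distance_between_kmers
  by_cases hk : k1 = k2
  · subst hk; exact pvEqCase k1 t
  · rcases hpre with h | ⟨hs1, hs2, hWF, hR⟩
    · exact absurd h hk
    · exact pv_main k1 k2 t hk hs1 hs2 hWF hR
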